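-- pv_equiv track=rewrite | github.com/Udayps2303/trial03 | Codes/predict-pos-chunk-morph-features-using-bilstm-model.py | sentenceLengthsInLines
-- ===== SOURCE A (Python) =====
-- def sentenceLengthsInLines(lines, maxSentenceLength):
--     lengths = []
--     sentLen = 0
--     greaterDict = dict()
--     index = 0
--     for line in lines:
--         if line.strip():
--             sentLen += 1
--         else:
--             if sentLen > maxSentenceLength:
--                 greaterDict[index] = sentLen
--                 for i in range(sentLen // maxSentenceLength):
--                     lengths.append(maxSentenceLength)
--                 lengths = lengths if not (
--                     sentLen % maxSentenceLength) else lengths + [sentLen % maxSentenceLength]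
--             else:
--                 lengths.append(sentLen)
--             sentLen = 0
--             index += 1
--     if sentLen > 0:
--         if sentLen > maxSentenceLength:
--             greaterDict[index] = sentLen
--             for i in range(sentLen // maxSentenceLength):
--                 lengths.append(maxSentenceLength)
--             lengths = lengths if not (
--                 sentLen % maxSentenceLength) else lengths + [sentLen % maxSentenceLength]
--         else:
--             lengths.append(sentLen)
--     sentLen = 0
--     return lengths, greaterDict
-- ===== SOURCE B (Python) =====
-- def sentenceLengthsInLines(lines, maxSentenceLength):
--     # pass 1: collect sentence lengths (blank line ends a sentence, possibly 0;
--     # a trailing sentence counts only if nonzero)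
--     sentLengths = []
--     count = 0
--     for line in lines:
--         if line.strip():
--             count += 1
--         else:
--             sentLengths.append(count)
--             count = 0
--     if count > 0:
--         sentLengths.append(count)
--     # pass 2: chunk each sentence length by maxSentenceLength
--     lengths = []
--     greaterDict = {}
--     for idx, length in enumerate(sentLengths):
--         if length > maxSentenceLength:
--             greaterDict[idx] = length
--             lengths.extend([maxSentenceLength] * (length // maxSentenceLength))
--             if length % maxSentenceLength:
--                 lengths.append(length % maxSentenceLength)
--         else:
--             lengths.append(length)
--     return lengths, greaterDict
-- ===== Notes on version B (the rewrite author's own statement) =====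
-- stated objective: simpler
-- what changed: B separates the work into two passes -- first group the lines into a list of sentence lengths, then chunk each length with extend/replicate -- instead of A's single loop that interleaves counting, chunking via an inner range loop, and list rebinding.
import Mathlib
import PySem

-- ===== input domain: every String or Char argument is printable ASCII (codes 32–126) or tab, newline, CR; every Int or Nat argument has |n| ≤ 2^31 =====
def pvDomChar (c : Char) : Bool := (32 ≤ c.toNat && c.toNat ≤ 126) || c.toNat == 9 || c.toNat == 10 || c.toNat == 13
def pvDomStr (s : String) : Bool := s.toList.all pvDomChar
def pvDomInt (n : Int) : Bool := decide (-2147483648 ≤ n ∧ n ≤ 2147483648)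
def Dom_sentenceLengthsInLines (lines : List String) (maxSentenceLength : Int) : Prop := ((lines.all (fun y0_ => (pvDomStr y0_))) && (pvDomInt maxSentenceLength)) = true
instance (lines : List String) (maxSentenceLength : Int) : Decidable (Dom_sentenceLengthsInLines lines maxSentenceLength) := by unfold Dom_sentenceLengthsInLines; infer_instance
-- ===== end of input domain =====

-- B replaces A's single interleaved loop by two passes (group sentence lengths, then chunk
-- each one); objective: simpler. Equal return values proved on Pre_ (where Python A returns).

-- ===== PORT A =====
def sentenceLengthsInLines (lines : List String) (maxSentenceLength : Int) : List Int × (List (Int × Int)) :=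
  let st := lines.foldl
    (fun (st : List Int × Int × PySem.Dict Int Int × Int) line =>
      let lengths := st.1; let sentLen := st.2.1
      let greaterDict := st.2.2.1; let index := st.2.2.2
      if PySem.Str.strip line ≠ "" then
        (lengths, sentLen + 1, greaterDict, index)
      else
        if sentLen > maxSentenceLength then
          let greaterDict := greaterDict.insert index sentLen
          let lengths := (PySem.List.pyRange 0 (PySem.Int.floordiv sentLen maxSentenceLength) 1).foldl
            (fun acc _ => acc ++ [maxSentenceLength]) lengths
          let lengths := if PySem.Int.mod sentLen maxSentenceLength = 0 then lengths
                         else lengths ++ [PySem.Int.mod sentLen maxSentenceLength]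
          (lengths, 0, greaterDict, index + 1)
        else
          (lengths ++ [sentLen], 0, greaterDict, index + 1))
    ([], 0, PySem.Dict.empty, 0)
  let lengths := st.1; let sentLen := st.2.1
  let greaterDict := st.2.2.1; let index := st.2.2.2
  if sentLen > 0 then
    if sentLen > maxSentenceLength then
      let greaterDict := greaterDict.insert index sentLen
      let lengths := (PySem.List.pyRange 0 (PySem.Int.floordiv sentLen maxSentenceLength) 1).foldl
        (fun acc _ => acc ++ [maxSentenceLength]) lengths
      let lengths := if PySem.Int.mod sentLen maxSentenceLength = 0 then lengths
                     else lengths ++ [PySem.Int.mod sentLen maxSentenceLength]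
      (lengths, greaterDict.items)
    else (lengths ++ [sentLen], greaterDict.items)
  else (lengths, greaterDict.items)

-- ===== PORT B =====
def sentenceLengthsInLines_alt (lines : List String) (maxSentenceLength : Int) : List Int × (List (Int × Int)) :=
  -- pass 1: group lines into the list of sentence lengths
  let g := lines.foldl
    (fun (st : List Int × Int) line =>
      if PySem.Str.strip line ≠ "" then (st.1, st.2 + 1) else (st.1 ++ [st.2], 0))
    ([], 0)
  let sentLengths := if g.2 > 0 then g.1 ++ [g.2] else g.1
  -- pass 2: chunk each sentence length
  let r := (PySem.List.enumerate sentLengths 0).foldl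
    (fun (st : List Int × PySem.Dict Int Int) p =>
      if p.2 > maxSentenceLength then
        let d := st.2.insert p.1 p.2
        let L := st.1 ++ List.replicate (PySem.Int.floordiv p.2 maxSentenceLength).toNat maxSentenceLength
        let L := if PySem.Int.mod p.2 maxSentenceLength ≠ 0 then L ++ [PySem.Int.mod p.2 maxSentenceLength] else L
        (L, d)
      else (st.1 ++ [p.2], st.2))
    ([], PySem.Dict.empty)
  (r.1, r.2.items)

-- ===== PRECONDITION & SPEC =====
-- Pre_ excludes exactly the inputs where Python A raises ZeroDivisionError:
-- maxSentenceLength = 0 together with at least one non-blank line (both A and B raise there).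
def Pre_sentenceLengthsInLines (lines : List String) (maxSentenceLength : Int) : Prop :=
  maxSentenceLength ≠ 0 ∨ ∀ line ∈ lines, PySem.Str.strip line = ""
instance (lines : List String) (maxSentenceLength : Int) : Decidable (Pre_sentenceLengthsInLines lines maxSentenceLength) := by unfold Pre_sentenceLengthsInLines; infer_instance
def pvWitness_sentenceLengthsInLines : List String × Int := (["a b", "c", "", "d", "", ""], 2)

def Spec_sentenceLengthsInLines (lines : List String) (maxSentenceLength : Int) (out : List Int × (List (Int × Int))) : Prop := out = sentenceLengthsInLines_alt lines maxSentenceLength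
instance (lines : List String) (maxSentenceLength : Int) (out : List Int × (List (Int × Int))) : Decidable (Spec_sentenceLengthsInLines lines maxSentenceLength out) := by unfold Spec_sentenceLengthsInLines; infer_instance

-- ===== CLAIM (what is proved, stated in full; the proofs are below) =====
def Claim_equal_sentenceLengthsInLines : Prop := ∀ (lines : List String) (maxSentenceLength : Int), Dom_sentenceLengthsInLines lines maxSentenceLength → Pre_sentenceLengthsInLines lines maxSentenceLength → Spec_sentenceLengthsInLines lines maxSentenceLength (sentenceLengthsInLines lines maxSentenceLength)

-- ===== LEMMAS AND PROOFS =====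

-- B's grouping fold: the accumulated list is a prefix
theorem pv_group_prefix (lines : List String) (sl : List Int) (c : Int) :
    lines.foldl (fun (st : List Int × Int) line =>
        if PySem.Str.strip line ≠ "" then (st.1, st.2 + 1) else (st.1 ++ [st.2], 0)) (sl, c)
      = (sl ++ (lines.foldl (fun (st : List Int × Int) line =>
        if PySem.Str.strip line ≠ "" then (st.1, st.2 + 1) else (st.1 ++ [st.2], 0)) ([], c)).1,
        (lines.foldl (fun (st : List Int × Int) line =>
        if PySem.Str.strip line ≠ "" then (st.1, st.2 + 1) else (st.1 ++ [st.2], 0)) ([], c)).2) := by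
  induction lines generalizing sl c with
  | nil => simp
  | cons x xs ih =>
    by_cases h : PySem.Str.strip x ≠ ""
    · simp only [List.foldl_cons, if_pos h]; exact ih sl (c + 1)
    · simp only [List.foldl_cons, if_neg h]
      rw [ih (sl ++ [c]) 0, ih ([] ++ [c]) 0]
      simp [List.append_assoc]

-- abbreviations used only by the proofs
def pvGroup (lines : List String) (c : Int) : List Int :=
  let g := lines.foldl
    (fun (st : List Int × Int) line =>
      if PySem.Str.strip line ≠ "" then (st.1, st.2 + 1) else (st.1 ++ [st.2], 0)) ([], c)
  if g.2 > 0 then g.1 ++ [g.2] else g.1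

def pvStep (m : Int) (st : List Int × PySem.Dict Int Int) (p : Int × Int) : List Int × PySem.Dict Int Int :=
  if p.2 > m then
    let d := st.2.insert p.1 p.2
    let L := st.1 ++ List.replicate (PySem.Int.floordiv p.2 m).toNat m
    let L := if PySem.Int.mod p.2 m ≠ 0 then L ++ [PySem.Int.mod p.2 m] else L
    (L, d)
  else (st.1 ++ [p.2], st.2)

def pvAfullLoop (m : Int) (lines : List String) (st : List Int × Int × PySem.Dict Int Int × Int) :
    List Int × Int × PySem.Dict Int Int × Int :=
  lines.foldl
    (fun (st : List Int × Int × PySem.Dict Int Int × Int) line =>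
      let lengths := st.1; let sentLen := st.2.1
      let greaterDict := st.2.2.1; let index := st.2.2.2
      if PySem.Str.strip line ≠ "" then
        (lengths, sentLen + 1, greaterDict, index)
      else
        if sentLen > m then
          let greaterDict := greaterDict.insert index sentLen
          let lengths := (PySem.List.pyRange 0 (PySem.Int.floordiv sentLen m) 1).foldl
            (fun acc _ => acc ++ [m]) lengths
          let lengths := if PySem.Int.mod sentLen m = 0 then lengths
                         else lengths ++ [PySem.Int.mod sentLen m]
          (lengths, 0, greaterDict, index + 1)
        else
          (lengths ++ [sentLen], 0, greaterDict, index + 1)) st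

def pvAfull (m : Int) (lines : List String) (L : List Int) (s : Int) (G : PySem.Dict Int Int) (i : Int) :
    List Int × PySem.Dict Int Int :=
  let st := pvAfullLoop m lines (L, s, G, i)
  let lengths := st.1; let sentLen := st.2.1
  let greaterDict := st.2.2.1; let index := st.2.2.2
  if sentLen > 0 then
    if sentLen > m then
      let greaterDict := greaterDict.insert index sentLen
      let lengths := (PySem.List.pyRange 0 (PySem.Int.floordiv sentLen m) 1).foldl
        (fun acc _ => acc ++ [m]) lengths
      let lengths := if PySem.Int.mod sentLen m = 0 then lengths
                     else lengths ++ [PySem.Int.mod sentLen m]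
      (lengths, greaterDict)
    else (lengths ++ [sentLen], greaterDict)
  else (lengths, greaterDict)

-- main invariant: A's loop+trailing equals B's second pass over the grouped lengths
theorem pv_main (m : Int) (lines : List String) :
    ∀ (s i : Int) (L : List Int) (G : PySem.Dict Int Int),
    pvAfull m lines L s G i
      = (PySem.List.enumerate (pvGroup lines s) i).foldl (pvStep m) (L, G) := by
  induction lines with
  | nil =>
    intro s i L G
    unfold pvAfull pvAfullLoop pvGroup
    by_cases hs : s > 0
    · by_cases h : s > m <;> by_cases h0 : PySem.Int.mod s m = 0 <;>
        simp [hs, h, h0, pvStep,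
          PySem.List.enumerate_cons, PySem.List.enumerate_nil]
    · simp [hs, PySem.List.enumerate_nil]
  | cons line rest ih =>
    intro s i L G
    by_cases hb : PySem.Str.strip line ≠ ""
    · -- non-blank: count goes up on both sides
      have hA : pvAfull m (line :: rest) L s G i = pvAfull m rest L (s + 1) G i := by
        unfold pvAfull pvAfullLoop; simp [hb]
      have hGrp : pvGroup (line :: rest) s = pvGroup rest (s + 1) := by
        unfold pvGroup; simp [hb]
      rw [hA, hGrp, ih]
    · -- blank: a sentence of length s is emitted, index advances
      rw [not_not] at hb
      have hA : pvAfull m (line :: rest) L s G i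
          = pvAfull m rest (pvStep m (L, G) (i, s)).1 0 (pvStep m (L, G) (i, s)).2 (i + 1) := by
        unfold pvAfull pvAfullLoop
        by_cases h : s > m <;> by_cases h0 : PySem.Int.mod s m = 0 <;>
          simp [hb, h, h0, pvStep]
      have hGrp : pvGroup (line :: rest) s = s :: pvGroup rest 0 := by
        unfold pvGroup
        simp only [List.foldl_cons, hb, ne_eq, not_true_eq_false, if_false]
        rw [pv_group_prefix]
        simp [apply_ite (List.cons s)]
      rw [hA, ih, hGrp, PySem.List.enumerate_cons, List.foldl_cons]
    
-- A's function is pvAfull, B's is the grouped second pass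
theorem pv_A_eq (lines : List String) (m : Int) :
    sentenceLengthsInLines lines m
      = ((pvAfull m lines [] 0 PySem.Dict.empty 0).1, (pvAfull m lines [] 0 PySem.Dict.empty 0).2.items) := by
  unfold sentenceLengthsInLines pvAfull pvAfullLoop
  dsimp only
  split
  · split <;> rfl
  · rfl

theorem pv_B_eq (lines : List String) (m : Int) :
    sentenceLengthsInLines_alt lines m
      = ((((PySem.List.enumerate (pvGroup lines 0) 0).foldl (pvStep m) ([], PySem.Dict.empty))).1,
         (((PySem.List.enumerate (pvGroup lines 0) 0).foldl (pvStep m) ([], PySem.Dict.empty))).2.items) := by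
  unfold sentenceLengthsInLines_alt pvGroup pvStep
  rfl

-- ===== VERDICT (by name: the statement is the Claim_ definition above) =====
theorem sentenceLengthsInLines_spec : Claim_equal_sentenceLengthsInLines := by
  intro lines m _ _
  unfold Spec_sentenceLengthsInLines
  rw [pv_A_eq, pv_B_eq, pv_main]
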